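-- pv_equiv track=rewrite | github.com/vgangal101/CTCI_practice | CTCI_exercises/ch1/q2.py | isPermutation2
-- ===== SOURCE A (Python) =====
-- def isPermutation2(s1,s2):
--     s1_dict = {}
--     s2_dict = {}
--
--     for s in s1:
--         if s not in s1_dict.keys():
--             s1_dict[s] = 1
--         else:
--             s1_dict[s] += 1
--
--     for s in s2:
--         if s not in s2_dict.keys():
--             s2_dict[s] = 1
--         else:
--             s2_dict[s] += 1
--
--     return s1_dict == s2_dict
-- ===== SOURCE B (Python) =====
-- def isPermutation2(s1, s2):
--     return sorted(s1) == sorted(s2)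
-- ===== Notes on version B (the rewrite author's own statement) =====
-- stated objective: idiomatic
-- what changed: Replaces the two hand-built frequency dictionaries and dict comparison with the canonical sort-then-compare anagram check: sorted(s1) == sorted(s2).
import Mathlib
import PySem

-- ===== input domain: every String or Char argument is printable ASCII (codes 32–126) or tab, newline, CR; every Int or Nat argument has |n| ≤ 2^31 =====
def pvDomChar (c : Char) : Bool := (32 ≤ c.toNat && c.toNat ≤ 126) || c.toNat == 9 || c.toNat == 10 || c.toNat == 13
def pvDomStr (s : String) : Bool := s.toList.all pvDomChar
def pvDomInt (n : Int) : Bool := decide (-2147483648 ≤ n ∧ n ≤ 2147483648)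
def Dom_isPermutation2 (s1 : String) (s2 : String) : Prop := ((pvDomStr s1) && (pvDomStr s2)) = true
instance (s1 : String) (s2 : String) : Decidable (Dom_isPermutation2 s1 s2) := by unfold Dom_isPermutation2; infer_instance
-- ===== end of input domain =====

-- B replaces A's two frequency dictionaries compared with dict == by the idiomatic
-- sorted(s1) == sorted(s2) anagram check; same result, different strategy.

-- ===== PORT A =====
-- Python's `d1 == d2` on dicts ignores insertion order: equal iff every item of
-- each dict is found (same key, same value) in the other.
def pvPyDictEq (d1 : PySem.Dict Char Int) (d2 : PySem.Dict Char Int) : Bool :=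
  d1.items.all (fun kv => d2.get? kv.1 == some kv.2) &&
  d2.items.all (fun kv => d1.get? kv.1 == some kv.2)

-- the body of A's counting loop: `if s not in d: d[s]=1 else: d[s]+=1`
-- (inside the else branch the key is present, so `d[s]` reads `d.getD s 0` exactly)
def pvCountStep (d : PySem.Dict Char Int) (c : Char) : PySem.Dict Char Int :=
  if d.contains c = false then d.insert c 1 else d.insert c (d.getD c 0 + 1)

def isPermutation2 (s1 : String) (s2 : String) : Bool :=
  let s1_dict := s1.toList.foldl pvCountStep PySem.Dict.empty
  let s2_dict := s2.toList.foldl pvCountStep PySem.Dict.empty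
  pvPyDictEq s1_dict s2_dict

-- ===== PORT B =====
def isPermutation2_alt (s1 : String) (s2 : String) : Bool :=
  PySem.List.sorted s1.toList (fun c => c) false == PySem.List.sorted s2.toList (fun c => c) false

-- ===== PRECONDITION & SPEC =====
def Spec_isPermutation2 (s1 : String) (s2 : String) (out : Bool) : Prop := out = isPermutation2_alt s1 s2
instance (s1 : String) (s2 : String) (out : Bool) : Decidable (Spec_isPermutation2 s1 s2 out) := by unfold Spec_isPermutation2; infer_instance

-- ===== CLAIM (what is proved, stated in full; the proofs are below) =====
def Claim_equal_isPermutation2 : Prop := ∀ (s1 : String) (s2 : String), Dom_isPermutation2 s1 s2 → Spec_isPermutation2 s1 s2 (isPermutation2 s1 s2)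

-- ===== LEMMAS AND PROOFS =====

-- A's branching loop step is the standard counting step (in the "new key" branch getD is 0)
theorem pvCountStep_eq (d : PySem.Dict Char Int) (c : Char) :
    pvCountStep d c = d.insert c (d.getD c 0 + 1) := by
  unfold pvCountStep
  split_ifs with h
  · rw [PySem.Dict.getD_of_not_contains d 0 h]; norm_num
  · rfl

theorem pvFold_eq_counter (l : List Char) :
    l.foldl pvCountStep PySem.Dict.empty = PySem.Dict.counter l := by
  have : l.foldl pvCountStep PySem.Dict.empty
      = l.foldl (fun d x => d.insert x (d.getD x 0 + 1)) PySem.Dict.empty := by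
    congr 1
    funext d c
    exact pvCountStep_eq d c
  rw [this, PySem.Dict.foldl_insert_getD_add_one_eq_counter]

theorem pvGet?_counter_of_mem {l : List Char} {k : Char} (h : k ∈ l) :
    (PySem.Dict.counter l).get? k = some (l.count k : Int) := by
  rw [PySem.Dict.get?_eq_some_iff_mem_items _ _ _ (PySem.Dict.nodup_keys_counter l)]
  rw [PySem.Dict.items_counter]
  exact List.mem_map.mpr ⟨k, (PySem.Set.mem_ofList l k).mpr h, rfl⟩

theorem pvPyDictEq_counter_iff (l1 l2 : List Char) :
    pvPyDictEq (PySem.Dict.counter l1) (PySem.Dict.counter l2) = true ↔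
      ∀ x, l1.count x = l2.count x := by
  unfold pvPyDictEq
  simp only [Bool.and_eq_true, List.all_eq_true, beq_iff_eq]
  constructor
  · rintro ⟨h12, h21⟩ x
    by_cases hx1 : x ∈ l1
    · have := h12 (x, (l1.count x : Int)) (by
        rw [PySem.Dict.items_counter]
        exact List.mem_map.mpr ⟨x, (PySem.Set.mem_ofList l1 x).mpr hx1, rfl⟩)
      have hgd : (PySem.Dict.counter l2).getD x 0 = (l1.count x : Int) :=
        PySem.Dict.getD_of_get?_eq_some _ 0 this
      rw [PySem.Dict.getD_counter] at hgd
      exact_mod_cast hgd.symm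
    · by_cases hx2 : x ∈ l2
      · have := h21 (x, (l2.count x : Int)) (by
          rw [PySem.Dict.items_counter]
          exact List.mem_map.mpr ⟨x, (PySem.Set.mem_ofList l2 x).mpr hx2, rfl⟩)
        have hgd : (PySem.Dict.counter l1).getD x 0 = (l2.count x : Int) :=
          PySem.Dict.getD_of_get?_eq_some _ 0 this
        rw [PySem.Dict.getD_counter] at hgd
        exact_mod_cast hgd
      · rw [List.count_eq_zero_of_not_mem hx1, List.count_eq_zero_of_not_mem hx2]
  · intro h
    constructor
    · intro kv hkv
      rw [PySem.Dict.items_counter] at hkv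
      obtain ⟨k', hk', rfl⟩ := List.mem_map.mp hkv
      have hk1 : k' ∈ l1 := (PySem.Set.mem_ofList l1 k').mp hk'
      have hk2 : k' ∈ l2 := List.count_pos_iff.mp (h k' ▸ List.count_pos_iff.mpr hk1)
      rw [pvGet?_counter_of_mem hk2, h k']
    · intro kv hkv
      rw [PySem.Dict.items_counter] at hkv
      obtain ⟨k', hk', rfl⟩ := List.mem_map.mp hkv
      have hk2 : k' ∈ l2 := (PySem.Set.mem_ofList l2 k').mp hk'
      have hk1 : k' ∈ l1 := List.count_pos_iff.mp ((h k').symm ▸ List.count_pos_iff.mpr hk2)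
      rw [pvGet?_counter_of_mem hk1, h k']

-- ===== VERDICT (by name: the statement is the Claim_ definition above) =====
theorem isPermutation2_spec : Claim_equal_isPermutation2 := by
  intro s1 s2 _
  unfold Spec_isPermutation2 isPermutation2 isPermutation2_alt
  simp only [pvFold_eq_counter]
  rw [Bool.eq_iff_iff, pvPyDictEq_counter_iff, beq_iff_eq,
    PySem.List.sorted_id_eq_sorted_id_iff_perm]
  exact (List.perm_iff_count).symm
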